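-- pv_equiv track=rewrite | github.com/shtratos/ms-uk-payslip-parser | parser.py | enforce_order
-- ===== SOURCE A (Python) =====
-- def partition(pred, iterable):
--     'Use a predicate to partition entries into false entries and true entries'
--     # partition(is_odd, range(10)) --> 0 2 4 6 8   and  1 3 5 7 9
--     from itertools import tee
--     from itertools import filterfalse
--     t1, t2 = tee(iterable)
--     return filterfalse(pred, t1), filter(pred, t2)
--
-- def enforce_order(iterable, prefixes: list):
--     remainder = iterable
--     result = []
--     for prefix in prefixes:
--         remainder, matching = partition(lambda x: x.startswith(prefix), remainder)
--         remainder = list(remainder)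
--         result += sorted(matching)
--     result += sorted(remainder)
--     return result
-- ===== SOURCE B (Python) =====
-- def enforce_order(iterable, prefixes: list):
--     # Single pass: assign each item to the bucket of the first prefix it
--     # matches (bucket len(prefixes) = no match), then concatenate sorted buckets.
--     n = len(prefixes)
--     buckets = [[] for _ in range(n + 1)]
--     for x in iterable:
--         i = next((k for k, p in enumerate(prefixes) if x.startswith(p)), n)
--         buckets[i].append(x)
--     out = []
--     for b in buckets:
--         out += sorted(b)
--     return out
-- ===== Notes on version B (the rewrite author's own statement) =====
-- stated objective: alternative
-- what changed: Instead of repeatedly partitioning the shrinking remainder once per prefix (building intermediate lists each round), B makes a single pass over the items, assigning each to the bucket of its first matching prefix, then concatenates the sorted buckets.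
import Mathlib
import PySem

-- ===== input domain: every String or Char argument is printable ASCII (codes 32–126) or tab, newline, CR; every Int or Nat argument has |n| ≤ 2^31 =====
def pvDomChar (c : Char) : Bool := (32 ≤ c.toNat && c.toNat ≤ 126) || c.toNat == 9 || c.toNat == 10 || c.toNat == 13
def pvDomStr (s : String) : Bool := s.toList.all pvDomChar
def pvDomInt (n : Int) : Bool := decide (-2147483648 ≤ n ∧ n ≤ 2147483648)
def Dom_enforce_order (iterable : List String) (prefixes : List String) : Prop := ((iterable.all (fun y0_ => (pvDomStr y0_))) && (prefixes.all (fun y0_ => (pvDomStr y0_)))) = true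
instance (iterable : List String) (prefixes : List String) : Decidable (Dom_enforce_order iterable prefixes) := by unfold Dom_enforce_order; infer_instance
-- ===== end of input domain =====

-- B replaces A's repeated partition-of-the-remainder (one pass per prefix) by a single pass
-- bucketing each item under its first matching prefix, then concatenating the sorted buckets.


-- ===== PORT A =====
-- the for-loop over prefixes, carrying (remainder, result); partition = the two filters
def enforceGo (remainder : List String) (result : List String) (prefixes : List String) : List String :=
  match prefixes with
  | [] => result ++ PySem.List.sorted remainder (fun s => s) false
  | p :: ps =>
      enforceGo (remainder.filter (fun x => !(PySem.Str.startswith x p)))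
                (result ++ PySem.List.sorted (remainder.filter (fun x => PySem.Str.startswith x p)) (fun s => s) false)
                ps

def enforce_order (iterable : List String) (prefixes : List String) : List String :=
  enforceGo iterable [] prefixes

-- ===== PORT B =====
-- index of the first prefix x starts with, or prefixes.length if none (the `next(…, n)` of Source B)
def firstIdx (x : String) (prefixes : List String) : Nat :=
  match prefixes with
  | [] => 0
  | p :: ps => if PySem.Str.startswith x p then 0 else firstIdx x ps + 1

-- buckets[i].append(x) with i = firstIdx x prefixes
def bstep (prefixes : List String) (buckets : List (List String)) (x : String) : List (List String) :=
  buckets.set (firstIdx x prefixes) (buckets.getD (firstIdx x prefixes) [] ++ [x])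

def enforce_order_alt (iterable : List String) (prefixes : List String) : List String :=
  (iterable.foldl (bstep prefixes)
      ((List.range (prefixes.length + 1)).map (fun _ => ([] : List String)))).foldl
    (fun out b => out ++ PySem.List.sorted b (fun s => s) false) []

-- ===== PRECONDITION & SPEC =====
def Spec_enforce_order (iterable : List String) (prefixes : List String) (out : List String) : Prop := out = enforce_order_alt iterable prefixes
instance (iterable : List String) (prefixes : List String) (out : List String) : Decidable (Spec_enforce_order iterable prefixes out) := by unfold Spec_enforce_order; infer_instance

-- ===== CLAIM (what is proved, stated in full; the proofs are below) =====
def Claim_equal_enforce_order : Prop := ∀ (iterable : List String) (prefixes : List String), Dom_enforce_order iterable prefixes → Spec_enforce_order iterable prefixes (enforce_order iterable prefixes)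

-- ===== LEMMAS AND PROOFS =====

-- common characterization: concatenation over bucket indices of the sorted filtered sublists
def groups (r : List String) (ps : List String) : List String :=
  (List.range (ps.length + 1)).flatMap
    (fun i => PySem.List.sorted (r.filter (fun x => firstIdx x ps == i)) (fun s => s) false)

lemma firstIdx_le (x : String) (ps : List String) : firstIdx x ps ≤ ps.length := by
  induction ps with
  | nil => simp [firstIdx]
  | cons p ps ih =>
      by_cases h : PySem.Chars.startswith x.toList p.toList = true <;>
        simp [firstIdx, PySem.Str.startswith_eq, h] <;> omega

lemma filter_firstIdx_zero (r : List String) (p : String) (ps : List String) :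
    r.filter (fun x => firstIdx x (p :: ps) == 0) = r.filter (fun x => PySem.Str.startswith x p) := by
  apply List.filter_congr
  intro x _
  by_cases h : PySem.Chars.startswith x.toList p.toList = true <;>
    simp [firstIdx, PySem.Str.startswith_eq, h]

lemma filter_firstIdx_succ (r : List String) (p : String) (ps : List String) (i : Nat) :
    r.filter (fun x => firstIdx x (p :: ps) == i + 1)
      = (r.filter (fun x => !(PySem.Str.startswith x p))).filter (fun x => firstIdx x ps == i) := by
  rw [List.filter_filter]
  apply List.filter_congr
  intro x _
  by_cases h : PySem.Chars.startswith x.toList p.toList = true <;>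
    simp [firstIdx, PySem.Str.startswith_eq, h]

lemma groups_nil (r : List String) : groups r [] = PySem.List.sorted r (fun s => s) false := by
  simp [groups, List.range_succ]
  congr 1
  exact List.filter_eq_self.mpr (by intro a _; simp [firstIdx])

lemma groups_cons (r : List String) (p : String) (ps : List String) :
    groups r (p :: ps)
      = PySem.List.sorted (r.filter (fun x => PySem.Str.startswith x p)) (fun s => s) false
        ++ groups (r.filter (fun x => !(PySem.Str.startswith x p))) ps := by
  unfold groups
  rw [show (p :: ps).length + 1 = (ps.length + 1) + 1 from rfl, List.range_succ_eq_map,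
      List.flatMap_cons, List.flatMap_map]
  rw [filter_firstIdx_zero]
  congr 1
  apply List.flatMap_congr  -- pointwise equality of the per-index functions
  intro i _
  rw [filter_firstIdx_succ]

lemma enforceGo_eq (ps : List String) : ∀ (r acc : List String),
    enforceGo r acc ps = acc ++ groups r ps := by
  induction ps with
  | nil => intro r acc; simp [enforceGo, groups_nil]
  | cons p ps ih =>
      intro r acc
      simp only [enforceGo]
      rw [ih, groups_cons, List.append_assoc]

lemma bstep_length (ps : List String) (bs : List (List String)) (x : String) :
    (bstep ps bs x).length = bs.length := by
  simp [bstep]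

lemma fold_buckets (ps : List String) (xs : List String) :
    ∀ (bs : List (List String)), bs.length = ps.length + 1 →
    xs.foldl (bstep ps) bs
      = (List.range (ps.length + 1)).map
          (fun i => bs.getD i [] ++ xs.filter (fun x => firstIdx x ps == i)) := by
  induction xs with
  | nil =>
      intro bs h
      simp only [List.foldl_nil, List.filter_nil, List.append_nil]
      apply List.ext_getElem
      · simp [h]
      · intro i h1 h2
        simp only [List.getElem_map, List.getElem_range]
        rw [List.getD_eq_getElem bs [] (by omega)]
  | cons x xs ih =>
      intro bs h
      rw [List.foldl_cons, ih (bstep ps bs x) (by rw [bstep_length, h])]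
      apply List.map_congr_left
      intro i hi
      simp only [List.mem_range] at hi
      have hj : firstIdx x ps < bs.length := by
        have := firstIdx_le x ps; omega
      by_cases hx : firstIdx x ps = i
      · subst hx
        simp only [List.filter_cons, beq_self_eq_true]
        rw [show (bstep ps bs x).getD (firstIdx x ps) []
              = bs.getD (firstIdx x ps) [] ++ [x] from ?_]
        · simp
        · unfold bstep
          rw [List.getD_eq_getElem _ [] (by simpa [bstep_length] using hj),
              List.getElem_set_self]
      · rw [List.filter_cons_of_neg (by simpa using hx)]
        congr 1
        unfold bstep
        rw [List.getD_eq_getElem _ [] (by simp; omega),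
            List.getElem_set_ne (by omega)]
        exact (List.getD_eq_getElem bs [] (by omega)).symm

lemma alt_eq_groups (iterable ps : List String) :
    enforce_order_alt iterable ps = groups iterable ps := by
  unfold enforce_order_alt
  rw [fold_buckets ps iterable _ (by simp)]
  rw [PySem.List.foldl_append_eq_flatMap]
  rw [List.flatMap_map]
  unfold groups
  apply List.flatMap_congr
  intro i hi
  simp only [List.mem_range] at hi
  congr 1
  rw [List.getD_eq_getElem _ [] (by simpa using hi)]
  simp

-- ===== VERDICT (by name: the statement is the Claim_ definition above) =====
theorem enforce_order_spec : Claim_equal_enforce_order := by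
  intro iterable prefixes _
  unfold Spec_enforce_order enforce_order
  rw [enforceGo_eq, alt_eq_groups, List.nil_append]
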